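-- pv_equiv track=rewrite | github.com/yx535233092/h3c_intelligent_computing_portal | python/python.py | detect_table_areas
-- ===== SOURCE A (Python) =====
-- from collections import deque
--
-- def find_bounding_box(area):
--     rows = [r for r, c in area]
--     cols = [c for r, c in area]
--     return min(rows)+1, min(cols)+1, max(rows)+1, max(cols)+1
--
-- def detect_table_areas(border_map):
--     visited = set()
--     rows, cols = len(border_map), len(border_map[0])
--     areas = []
--
--     def is_border_cell(r, c):
--         b = border_map[r][c]
--         return any(b.values())
--
--     def bfs(r, c):
--         q = deque()
--         q.append((r, c))
--         area = {(r, c)}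
--         visited.add((r, c))
--
--         while q:
--             cr, cc = q.popleft()
--             for dr, dc in [(-1,0),(1,0),(0,-1),(0,1)]:
--                 nr, nc = cr+dr, cc+dc
--                 if 0 <= nr < rows and 0 <= nc < cols and (nr, nc) not in visited:
--                     if is_border_cell(nr, nc):
--                         visited.add((nr, nc))
--                         area.add((nr, nc))
--                         q.append((nr, nc))
--         return area
--
--     for i in range(rows):
--         for j in range(cols):
--             if is_border_cell(i, j) and (i, j) not in visited:
--                 area = bfs(i, j)
--                 areas.append(find_bounding_box(area))  # 返回 (start_row, start_col, end_row, end_col)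
--
--     return areas
-- ===== SOURCE B (Python) =====
-- def detect_table_areas(border_map):
--     rows, cols = len(border_map), len(border_map[0])
--     # precompute the border test once per cell
--     border = [[any(cell.values()) for cell in row[:cols]] for row in border_map]
--     seen = set()
--     areas = []
--     for i in range(rows):
--         for j in range(cols):
--             if border[i][j] and (i, j) not in seen:
--                 seen.add((i, j))
--                 stack = [(i, j)]
--                 minr = maxr = i
--                 minc = maxc = j
--                 while stack:
--                     r, c = stack.pop()
--                     if r < minr: minr = r
--                     if r > maxr: maxr = r
--                     if c < minc: minc = c
--                     if c > maxc: maxc = c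
--                     for nr, nc in ((r - 1, c), (r + 1, c), (r, c - 1), (r, c + 1)):
--                         if 0 <= nr < rows and 0 <= nc < cols and border[nr][nc] and (nr, nc) not in seen:
--                             seen.add((nr, nc))
--                             stack.append((nr, nc))
--                 areas.append((minr + 1, minc + 1, maxr + 1, maxc + 1))
--     return areas
-- ===== Notes on version B (the rewrite author's own statement) =====
-- stated objective: alternative
-- what changed: B precomputes the whole border matrix once, flood-fills each component with an explicit-stack DFS (pop from the end) instead of A's deque BFS, and maintains the bounding box incrementally while popping instead of collecting a per-component cell set and scanning it four times with min/max; the proof shows the visit order does not change the component or its bounding box.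
import Mathlib
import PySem

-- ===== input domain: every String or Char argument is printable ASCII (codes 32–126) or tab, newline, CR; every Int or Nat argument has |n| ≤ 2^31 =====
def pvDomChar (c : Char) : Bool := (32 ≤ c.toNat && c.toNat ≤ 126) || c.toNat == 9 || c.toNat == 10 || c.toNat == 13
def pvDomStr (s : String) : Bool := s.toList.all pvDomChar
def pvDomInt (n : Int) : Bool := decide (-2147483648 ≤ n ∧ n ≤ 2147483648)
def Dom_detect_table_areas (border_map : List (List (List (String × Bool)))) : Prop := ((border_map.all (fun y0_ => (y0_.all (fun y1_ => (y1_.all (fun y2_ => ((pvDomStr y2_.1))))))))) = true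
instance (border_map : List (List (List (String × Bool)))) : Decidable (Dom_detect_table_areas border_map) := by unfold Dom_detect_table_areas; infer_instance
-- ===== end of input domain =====

-- B replaces A's deque BFS + per-component cell set + four min/max scans by a precomputed
-- border matrix, an explicit-stack DFS and an incrementally maintained bounding box (objective:
-- alternative; the traversal order differs, the proof shows the order does not matter).
-- ===== PORT A =====
-- Port of A: BFS flood fill with a deque, per-component cell set, bbox = min/max scans of the set.
def pvA_isB (bm : List (List (List (String × Bool)))) (r c : Int) : Bool :=
  (PySem.Dict.ofList (PySem.List.pyGetD (PySem.List.pyGetD bm r []) c [])).values.any (fun b => b)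

def pvA_bbox (area : PySem.Set (Int × Int)) : Int × Int × Int × Int :=
  let rs := area.map (fun p => p.1)
  let cs := area.map (fun p => p.2)
  match PySem.List.min? rs (fun x => x), PySem.List.min? cs (fun x => x),
        PySem.List.max? rs (fun x => x), PySem.List.max? cs (fun x => x) with
  | some a, some b, some c, some d => (a + 1, b + 1, c + 1, d + 1)
  | _, _, _, _ => (0, 0, 0, 0)   -- unreachable: area is nonempty at every call site

-- the while loop of bfs; fuel only makes it total, it is proved large enough below
def pvA_bfs (bm : List (List (List (String × Bool)))) (rows cols : Int) :
    Nat → List (Int × Int) → PySem.Set (Int × Int) → PySem.Set (Int × Int) →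
    PySem.Set (Int × Int) × PySem.Set (Int × Int)
  | 0, _, area, visited => (area, visited)
  | _ + 1, [], area, visited => (area, visited)
  | fuel + 1, (cr, cc) :: rest, area, visited =>
    let st := [((-1 : Int), (0 : Int)), (1, 0), (0, -1), (0, 1)].foldl
      (fun (s : List (Int × Int) × PySem.Set (Int × Int) × PySem.Set (Int × Int)) d =>
        let nr := cr + d.1
        let nc := cc + d.2
        if 0 ≤ nr ∧ nr < rows ∧ 0 ≤ nc ∧ nc < cols ∧ (nr, nc) ∉ s.2.2 then
          if pvA_isB bm nr nc then
            (s.1 ++ [(nr, nc)], PySem.Set.add s.2.1 (nr, nc), PySem.Set.add s.2.2 (nr, nc))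
          else s
        else s)
      (rest, area, visited)
    pvA_bfs bm rows cols fuel st.1 st.2.1 st.2.2

def detect_table_areas (border_map : List (List (List (String × Bool)))) : List (Int × Int × Int × Int) :=
  let rows : Int := PySem.List.len border_map
  let cols : Int := PySem.List.len (PySem.List.pyGetD border_map 0 [])
  let fuel : Nat := (rows.toNat * cols.toNat + 1) * (rows.toNat * cols.toNat + 1)
  let st := (PySem.List.pyRange 0 rows 1).foldl
    (fun st i => (PySem.List.pyRange 0 cols 1).foldl
      (fun (st : PySem.Set (Int × Int) × List (Int × Int × Int × Int)) j =>
        if pvA_isB border_map i j = true ∧ (i, j) ∉ st.1 then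
          let r := pvA_bfs border_map rows cols fuel [(i, j)]
            (PySem.Set.add PySem.Set.empty (i, j)) (PySem.Set.add st.1 (i, j))
          (r.2, st.2 ++ [pvA_bbox r.1])
        else st) st)
    (PySem.Set.empty, [])
  st.2

-- ===== PORT B =====
-- B: border matrix precomputed once, DFS with an explicit stack, bbox maintained incrementally.
def pvB_test (cell : List (String × Bool)) : Bool :=
  (PySem.Dict.ofList cell).values.any (fun b => b)

def pvB_grid (bm : List (List (List (String × Bool)))) (cols : Int) : List (List Bool) :=
  bm.map (fun row => (PySem.List.slice row none (some cols)).map pvB_test)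

def pvB_get (border : List (List Bool)) (r c : Int) : Bool :=
  (border.getD r.toNat []).getD c.toNat false

-- the while loop of the DFS; fuel only makes it total, it is proved large enough below
def pvB_dfs (border : List (List Bool)) (rows cols : Int) :
    Nat → List (Int × Int) → Int × Int × Int × Int → PySem.Set (Int × Int) →
    (Int × Int × Int × Int) × PySem.Set (Int × Int)
  | 0, _, bbox, seen => (bbox, seen)
  | fuel + 1, stack, bbox, seen =>
    match PySem.List.pop? stack with
    | none => (bbox, seen)
    | some ((r, c), rest) =>
      let bbox' := (min bbox.1 r, min bbox.2.1 c, max bbox.2.2.1 r, max bbox.2.2.2 c)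
      let st := [((-1 : Int), (0 : Int)), (1, 0), (0, -1), (0, 1)].foldl
        (fun (s : List (Int × Int) × PySem.Set (Int × Int)) d =>
          let nr := r + d.1
          let nc := c + d.2
          if 0 ≤ nr ∧ nr < rows ∧ 0 ≤ nc ∧ nc < cols ∧ pvB_get border nr nc = true ∧ (nr, nc) ∉ s.2 then
            (s.1 ++ [(nr, nc)], PySem.Set.add s.2 (nr, nc))
          else s)
        (rest, seen)
      pvB_dfs border rows cols fuel st.1 bbox' st.2

def detect_table_areas_alt (border_map : List (List (List (String × Bool)))) : List (Int × Int × Int × Int) :=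
  let rows : Int := PySem.List.len border_map
  let cols : Int := PySem.List.len (PySem.List.pyGetD border_map 0 [])
  let border := pvB_grid border_map cols
  let fuel : Nat := (rows.toNat * cols.toNat + 1) * (rows.toNat * cols.toNat + 1)
  let st := (PySem.List.pyRange 0 rows 1).foldl
    (fun st i => (PySem.List.pyRange 0 cols 1).foldl
      (fun (st : PySem.Set (Int × Int) × List (Int × Int × Int × Int)) j =>
        if pvB_get border i j = true ∧ (i, j) ∉ st.1 then
          let r := pvB_dfs border rows cols fuel [(i, j)] (i, j, i, j) (PySem.Set.add st.1 (i, j))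
          (r.2, st.2 ++ [(r.1.1 + 1, r.1.2.1 + 1, r.1.2.2.1 + 1, r.1.2.2.2 + 1)])
        else st) st)
    (PySem.Set.empty, [])
  st.2

-- ===== PRECONDITION & SPEC =====
-- Pre_ excludes exactly the inputs where Python A raises IndexError: an empty border_map
-- (border_map[0]) and ragged maps whose some row is shorter than the first row (border_map[r][c]).
def Pre_detect_table_areas (border_map : List (List (List (String × Bool)))) : Prop :=
  border_map ≠ [] ∧ ∀ row ∈ border_map, (border_map.headD []).length ≤ row.length
instance (border_map : List (List (List (String × Bool)))) : Decidable (Pre_detect_table_areas border_map) := by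
  unfold Pre_detect_table_areas; infer_instance

def pvWitness_detect_table_areas : (List (List (List (String × Bool)))) :=
  [[[("a", true)], []], [[], [("b", true)]]]

def Spec_detect_table_areas (border_map : List (List (List (String × Bool)))) (out : List (Int × Int × Int × Int)) : Prop := out = detect_table_areas_alt border_map
instance (border_map : List (List (List (String × Bool)))) (out : List (Int × Int × Int × Int)) : Decidable (Spec_detect_table_areas border_map out) := by unfold Spec_detect_table_areas; infer_instance

-- ===== CLAIM (what is proved, stated in full; the proofs are below) =====
def Claim_equal_detect_table_areas : Prop := ∀ (border_map : List (List (List (String × Bool)))), Dom_detect_table_areas border_map → Pre_detect_table_areas border_map → Spec_detect_table_areas border_map (detect_table_areas border_map)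


-- ===== LEMMAS AND PROOFS =====

-- grid/adjacency vocabulary shared by both proofs
def pvInGrid (rows cols : Int) (x : Int × Int) : Prop :=
  0 ≤ x.1 ∧ x.1 < rows ∧ 0 ≤ x.2 ∧ x.2 < cols

def pvNb (x y : Int × Int) : Prop :=
  (y.1 = x.1 - 1 ∧ y.2 = x.2) ∨ (y.1 = x.1 + 1 ∧ y.2 = x.2) ∨
  (y.1 = x.1 ∧ y.2 = x.2 - 1) ∨ (y.1 = x.1 ∧ y.2 = x.2 + 1)

def pvAdj (t : Int × Int → Bool) (rows cols : Int) (x y : Int × Int) : Prop :=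
  pvNb x y ∧ pvInGrid rows cols y ∧ t y = true

def pvReach (t : Int × Int → Bool) (rows cols : Int) (s x : Int × Int) : Prop :=
  Relation.ReflTransGen (pvAdj t rows cols) s x

def pvClosed (t : Int × Int → Bool) (rows cols : Int) (v : List (Int × Int)) : Prop :=
  ∀ x ∈ v, ∀ y, pvAdj t rows cols x y → y ∈ v

lemma pvNb_symm {x y : Int × Int} (h : pvNb x y) : pvNb y x := by
  unfold pvNb at h ⊢; omega

lemma pvNb_of_dir {cr cc : Int} {d : Int × Int}
    (h : d ∈ [((-1 : Int), (0 : Int)), (1, 0), (0, -1), (0, 1)]) :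
    pvNb (cr, cc) (cr + d.1, cc + d.2) := by
  fin_cases h <;> simp [pvNb] <;> omega

lemma pvDir_of_nb {cr cc : Int} {y : Int × Int} (h : pvNb (cr, cc) y) :
    ∃ d ∈ [((-1 : Int), (0 : Int)), (1, 0), (0, -1), (0, 1)], y = (cr + d.1, cc + d.2) := by
  obtain ⟨y1, y2⟩ := y
  rcases h with ⟨h1, h2⟩ | ⟨h1, h2⟩ | ⟨h1, h2⟩ | ⟨h1, h2⟩
  · exact ⟨(-1, 0), by simp, by simp at h1 h2 ⊢; omega⟩
  · exact ⟨(1, 0), by simp, by simp at h1 h2 ⊢; omega⟩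
  · exact ⟨(0, -1), by simp, by simp at h1 h2 ⊢; omega⟩
  · exact ⟨(0, 1), by simp, by simp at h1 h2 ⊢; omega⟩

lemma pvReach_congr {t t' : Int × Int → Bool} {rows cols : Int}
    (h : ∀ y, pvInGrid rows cols y → t y = t' y) {s x : Int × Int}
    (hr : pvReach t rows cols s x) : pvReach t' rows cols s x :=
  Relation.ReflTransGen.mono
    (fun _ b hab => ⟨hab.1, hab.2.1, by rw [← h b hab.2.1]; exact hab.2.2⟩) hr

lemma pvReach_rev {t : Int × Int → Bool} {rows cols : Int} {s x : Int × Int}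
    (hs : pvInGrid rows cols s ∧ t s = true) (h : pvReach t rows cols s x) :
    (pvInGrid rows cols x ∧ t x = true) ∧ pvReach t rows cols x s := by
  induction h with
  | refl => exact ⟨hs, Relation.ReflTransGen.refl⟩
  | tail h1 h2 ih =>
    exact ⟨⟨h2.2.1, h2.2.2⟩,
      Relation.ReflTransGen.trans
        (Relation.ReflTransGen.single ⟨pvNb_symm h2.1, ih.1.1, ih.1.2⟩) ih.2⟩

lemma pvReach_mem_of_closed {t : Int × Int → Bool} {rows cols : Int}
    {v : List (Int × Int)} {s x : Int × Int}
    (hc : pvClosed t rows cols v) (hs : s ∈ v) (h : pvReach t rows cols s x) : x ∈ v := by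
  induction h with
  | refl => exact hs
  | tail _ h2 ih => exact hc _ ih _ h2

lemma pvCard {rows cols : Int} {l : List (Int × Int)} (hnd : l.Nodup)
    (h : ∀ x ∈ l, pvInGrid rows cols x) : l.length ≤ rows.toNat * cols.toNat := by
  have hsub : l ⊆ (PySem.List.pyRange 0 rows 1) ×ˢ (PySem.List.pyRange 0 cols 1) := by
    intro x hx; obtain ⟨x1, x2⟩ := x
    rcases h _ hx with ⟨h1, h2, h3, h4⟩
    exact List.mem_product.2
      ⟨PySem.List.mem_pyRange_one.2 ⟨h1, h2⟩, PySem.List.mem_pyRange_one.2 ⟨h3, h4⟩⟩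
  have hle := (List.subperm_of_subset hnd hsub).length_le
  simpa [List.length_product, PySem.List.length_pyRange_one] using hle

lemma pvFuelStep {N rl vl k fuel : Nat} (hN : vl + k ≤ N)
    (h : rl + 1 + (N + 1) * (N - vl) ≤ fuel + 1) :
    rl + k + (N + 1) * (N - (vl + k)) ≤ fuel := by
  have h1 : N - vl = (N - (vl + k)) + k := by omega
  rw [h1, Nat.mul_add] at h
  have h2 : k ≤ (N + 1) * k := Nat.le_mul_of_pos_left k (by omega)
  omega

lemma pvFuelTop (N m : Nat) : 1 + (N + 1) * (N - m) ≤ (N + 1) * (N + 1) := by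
  have h1 : (N + 1) * (N - m) ≤ (N + 1) * N := Nat.mul_le_mul_left _ (by omega)
  have h2 : (N + 1) * (N + 1) = (N + 1) * N + (N + 1) := by ring
  omega

-- one pass over the four directions in A's bfs
lemma pvA_step (bm : List (List (List (String × Bool)))) (rows cols cr cc : Int) :
    ∀ (dirs : List (Int × Int)) (q a v : List (Int × Int)), (∀ x ∈ a, x ∈ v) →
    ∃ new : List (Int × Int),
      dirs.foldl
        (fun (s : List (Int × Int) × PySem.Set (Int × Int) × PySem.Set (Int × Int)) d =>
          if 0 ≤ cr + d.1 ∧ cr + d.1 < rows ∧ 0 ≤ cc + d.2 ∧ cc + d.2 < cols ∧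
              (cr + d.1, cc + d.2) ∉ s.2.2 then
            if pvA_isB bm (cr + d.1) (cc + d.2) then
              (s.1 ++ [(cr + d.1, cc + d.2)], PySem.Set.add s.2.1 (cr + d.1, cc + d.2),
                PySem.Set.add s.2.2 (cr + d.1, cc + d.2))
            else s
          else s) (q, a, v)
      = (q ++ new, a ++ new, v ++ new) ∧
      new.Nodup ∧
      (∀ x ∈ new, x ∉ v ∧ (∃ d ∈ dirs, x = (cr + d.1, cc + d.2)) ∧
        pvInGrid rows cols x ∧ pvA_isB bm x.1 x.2 = true) ∧
      (∀ d ∈ dirs, ∀ y : Int × Int, y = (cr + d.1, cc + d.2) →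
        pvInGrid rows cols y → pvA_isB bm y.1 y.2 = true → y ∈ v ++ new) := by
  intro dirs
  induction dirs with
  | nil => intro q a v _; exact ⟨[], by simp⟩
  | cons d dirs ih =>
    intro q a v hav
    simp only [List.foldl_cons]
    by_cases hc1 : 0 ≤ cr + d.1 ∧ cr + d.1 < rows ∧ 0 ≤ cc + d.2 ∧ cc + d.2 < cols ∧
        (cr + d.1, cc + d.2) ∉ v
    · rw [if_pos hc1]
      by_cases hc2 : pvA_isB bm (cr + d.1) (cc + d.2) = true
      · rw [if_pos hc2]
        have hnotv : (cr + d.1, cc + d.2) ∉ v := hc1.2.2.2.2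
        have hnota : (cr + d.1, cc + d.2) ∉ a := fun hx => hnotv (hav _ hx)
        rw [PySem.Set.add_of_not_mem hnota, PySem.Set.add_of_not_mem hnotv]
        obtain ⟨new', heq, hnd, hprops, hcompl⟩ :=
          ih (q ++ [(cr + d.1, cc + d.2)]) (a ++ [(cr + d.1, cc + d.2)]) (v ++ [(cr + d.1, cc + d.2)])
            (by intro x hx; rcases List.mem_append.1 hx with h | h
                · exact List.mem_append.2 (Or.inl (hav _ h))
                · exact List.mem_append.2 (Or.inr h))
        refine ⟨(cr + d.1, cc + d.2) :: new', ?_, ?_, ?_, ?_⟩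
        · rw [heq]; simp
        · exact List.nodup_cons.2 ⟨fun hmem => ((hprops _ hmem).1) (by simp), hnd⟩
        · intro x hx
          rcases List.mem_cons.1 hx with hx | hx
          · subst hx
            exact ⟨hnotv, ⟨d, by simp, rfl⟩, ⟨hc1.1, hc1.2.1, hc1.2.2.1, hc1.2.2.2.1⟩, hc2⟩
          · obtain ⟨hxv, ⟨d', hd', hde⟩, hg, hb⟩ := hprops _ hx
            exact ⟨fun hxv2 => hxv (by simp [hxv2]), ⟨d', by simp [hd'], hde⟩, hg, hb⟩
        · intro d' hd' y hy hg hb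
          rcases List.mem_cons.1 hd' with rfl | hd'
          · subst hy; simp
          · have := hcompl d' hd' y hy hg hb
            simpa using this
      · rw [if_neg hc2]
        obtain ⟨new', heq, hnd, hprops, hcompl⟩ := ih q a v hav
        refine ⟨new', heq, hnd, ?_, ?_⟩
        · intro x hx
          obtain ⟨hxv, ⟨d', hd', hde⟩, hg, hb⟩ := hprops _ hx
          exact ⟨hxv, ⟨d', by simp [hd'], hde⟩, hg, hb⟩
        · intro d' hd' y hy hg hb
          rcases List.mem_cons.1 hd' with rfl | hd'
          · exfalso; subst hy; exact hc2 hb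
          · exact hcompl d' hd' y hy hg hb
    · rw [if_neg hc1]
      obtain ⟨new', heq, hnd, hprops, hcompl⟩ := ih q a v hav
      refine ⟨new', heq, hnd, ?_, ?_⟩
      · intro x hx
        obtain ⟨hxv, ⟨d', hd', hde⟩, hg, hb⟩ := hprops _ hx
        exact ⟨hxv, ⟨d', by simp [hd'], hde⟩, hg, hb⟩
      · intro d' hd' y hy hg hb
        rcases List.mem_cons.1 hd' with rfl | hd'
        · subst hy
          rcases hg with ⟨g1, g2, g3, g4⟩
          simp only [not_and, not_not] at hc1
          exact List.mem_append.2 (Or.inl (hc1 g1 g2 g3 g4))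
        · exact hcompl d' hd' y hy hg hb

-- full characterisation of A's bfs loop
lemma pvA_bfs_spec (bm : List (List (List (String × Bool)))) (rows cols : Int) :
    ∀ (fuel : Nat) (q a v : List (Int × Int)),
      (∀ x ∈ q, x ∈ v) → (∀ x ∈ a, x ∈ v) → v.Nodup →
      (∀ x ∈ v, pvInGrid rows cols x ∧ pvA_isB bm x.1 x.2 = true) →
      (∀ x ∈ v, x ∉ q → ∀ y, pvAdj (fun z => pvA_isB bm z.1 z.2) rows cols x y → y ∈ v) →
      q.length + (rows.toNat * cols.toNat + 1) * (rows.toNat * cols.toNat - v.length) ≤ fuel →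
      (∀ x ∈ v, x ∈ (pvA_bfs bm rows cols fuel q a v).2) ∧
      (∀ x ∈ (pvA_bfs bm rows cols fuel q a v).2,
        x ∈ v ∨ ∃ s ∈ q, pvReach (fun z => pvA_isB bm z.1 z.2) rows cols s x) ∧
      (∀ x, x ∈ (pvA_bfs bm rows cols fuel q a v).1 ↔
        x ∈ a ∨ (x ∈ (pvA_bfs bm rows cols fuel q a v).2 ∧ x ∉ v)) ∧
      (pvA_bfs bm rows cols fuel q a v).2.Nodup ∧
      (∀ x ∈ (pvA_bfs bm rows cols fuel q a v).2,
        pvInGrid rows cols x ∧ pvA_isB bm x.1 x.2 = true) ∧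
      pvClosed (fun z => pvA_isB bm z.1 z.2) rows cols (pvA_bfs bm rows cols fuel q a v).2 := by
  intro fuel
  induction fuel with
  | zero =>
    intro q a v h1 h2 h3 h4 h5 hfuel
    have hq : q = [] := List.eq_nil_of_length_eq_zero (by omega)
    subst hq
    simp only [pvA_bfs]
    refine ⟨fun x hx => hx, fun x hx => Or.inl hx, ?_, h3, h4, fun x hx y hy => h5 x hx (by simp) y hy⟩
    intro x
    constructor
    · exact fun hx => Or.inl hx
    · rintro (hx | ⟨hx, hnx⟩)
      · exact hx
      · exact absurd hx hnx
  | succ fuel ih =>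
    intro q a v h1 h2 h3 h4 h5 hfuel
    rcases q with _ | ⟨⟨cr, cc⟩, rest⟩
    · simp only [pvA_bfs]
      refine ⟨fun x hx => hx, fun x hx => Or.inl hx, ?_, h3, h4, fun x hx y hy => h5 x hx (by simp) y hy⟩
      intro x
      constructor
      · exact fun hx => Or.inl hx
      · rintro (hx | ⟨hx, hnx⟩)
        · exact hx
        · exact absurd hx hnx
    · obtain ⟨new, heq, hnd, hprops, hcompl⟩ :=
        pvA_step bm rows cols cr cc [((-1 : Int), (0 : Int)), (1, 0), (0, -1), (0, 1)] rest a v h2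
      simp only [pvA_bfs]
      rw [heq]
      simp only []
      -- re-established invariants
      have hdisj : v.Disjoint new := fun x hxv hxnew => (hprops x hxnew).1 hxv
      have hnd' : (v ++ new).Nodup := List.Nodup.append h3 hnd hdisj
      have hP' : ∀ x ∈ v ++ new, pvInGrid rows cols x ∧ pvA_isB bm x.1 x.2 = true := by
        intro x hx
        rcases List.mem_append.1 hx with hx | hx
        · exact h4 x hx
        · exact ⟨(hprops x hx).2.2.1, (hprops x hx).2.2.2⟩
      have hq' : ∀ x ∈ rest ++ new, x ∈ v ++ new := by
        intro x hx
        rcases List.mem_append.1 hx with hx | hx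
        · exact List.mem_append.2 (Or.inl (h1 x (by simp [hx])))
        · exact List.mem_append.2 (Or.inr hx)
      have ha' : ∀ x ∈ a ++ new, x ∈ v ++ new := by
        intro x hx
        rcases List.mem_append.1 hx with hx | hx
        · exact List.mem_append.2 (Or.inl (h2 x hx))
        · exact List.mem_append.2 (Or.inr hx)
      have hcl' : ∀ x ∈ v ++ new, x ∉ rest ++ new →
          ∀ y, pvAdj (fun z => pvA_isB bm z.1 z.2) rows cols x y → y ∈ v ++ new := by
        intro x hxv hxq y hadj
        rcases List.mem_append.1 hxv with hx | hx
        · by_cases hxc : x = (cr, cc)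
          · subst hxc
            obtain ⟨hnb, hg, hb⟩ := hadj
            obtain ⟨d, hd, rfl⟩ := pvDir_of_nb hnb
            exact hcompl d hd _ rfl hg hb
          · refine List.mem_append.2 (Or.inl (h5 x hx ?_ y hadj))
            intro hxq2
            rcases List.mem_cons.1 hxq2 with h | h
            · exact hxc h
            · exact hxq (List.mem_append.2 (Or.inl h))
        · exact absurd (List.mem_append.2 (Or.inr hx)) hxq
      have hN : (v ++ new).length ≤ rows.toNat * cols.toNat :=
        pvCard hnd' (fun x hx => (hP' x hx).1)
      have hfuel' : (rest ++ new).length +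
          (rows.toNat * cols.toNat + 1) * (rows.toNat * cols.toNat - (v ++ new).length) ≤ fuel := by
        have hlen : (v ++ new).length = v.length + new.length := List.length_append
        have hlenq : (rest ++ new).length = rest.length + new.length := List.length_append
        rw [hlen, hlenq]
        refine pvFuelStep (by omega) ?_
        have : ((cr, cc) :: rest).length = rest.length + 1 := by simp
        omega
      obtain ⟨i1, i2, i3, i4, i5, i6⟩ := ih (rest ++ new) (a ++ new) (v ++ new) hq' ha' hnd' hP' hcl' hfuel'
      have hnew_sub : ∀ x ∈ new, x ∈ (pvA_bfs bm rows cols fuel (rest ++ new) (a ++ new) (v ++ new)).2 :=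
        fun x hx => i1 x (List.mem_append.2 (Or.inr hx))
      have hreach_new : ∀ x ∈ new,
          pvReach (fun z => pvA_isB bm z.1 z.2) rows cols (cr, cc) x := by
        intro x hx
        obtain ⟨_, ⟨d, hd, rfl⟩, hg, hb⟩ := hprops x hx
        exact Relation.ReflTransGen.single ⟨pvNb_of_dir hd, hg, hb⟩
      refine ⟨?_, ?_, ?_, i4, i5, i6⟩
      · exact fun x hx => i1 x (List.mem_append.2 (Or.inl hx))
      · intro x hx
        rcases i2 x hx with hx2 | ⟨s, hs, hr⟩
        · rcases List.mem_append.1 hx2 with h | h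
          · exact Or.inl h
          · exact Or.inr ⟨(cr, cc), by simp, hreach_new x h⟩
        · rcases List.mem_append.1 hs with h | h
          · exact Or.inr ⟨s, by simp [h], hr⟩
          · exact Or.inr ⟨(cr, cc), by simp,
              Relation.ReflTransGen.trans (hreach_new s h) hr⟩
      · intro x
        rw [i3 x]
        constructor
        · rintro (hx | ⟨hx2, hx3⟩)
          · rcases List.mem_append.1 hx with h | h
            · exact Or.inl h
            · exact Or.inr ⟨hnew_sub x h, fun hv => hdisj hv h⟩
          · exact Or.inr ⟨hx2, fun hv => hx3 (List.mem_append.2 (Or.inl hv))⟩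
        · rintro (hx | ⟨hx2, hx3⟩)
          · exact Or.inl (List.mem_append.2 (Or.inl hx))
          · by_cases hxn : x ∈ new
            · exact Or.inl (List.mem_append.2 (Or.inr hxn))
            · refine Or.inr ⟨hx2, ?_⟩
              intro hv
              rcases List.mem_append.1 hv with h | h
              · exact hx3 h
              · exact hxn h

-- pop helpers for B's stack
lemma pvPop_nil : PySem.List.pop? ([] : List (Int × Int)) = none := by
  simp [PySem.List.pop?, PySem.List.pyIdx?]

lemma pvPop_concat (x : Int × Int) (ys : List (Int × Int)) :
    PySem.List.pop? (ys ++ [x]) = some (x, ys) := by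
  have h : ∀ (ys : List (Int × Int)), (ys ++ [x]).eraseIdx ys.length = ys := by
    intro ys
    induction ys with
    | nil => rfl
    | cons y t ih => simpa using ih
  simp only [PySem.List.pop?, PySem.List.pyIdx?]
  norm_num [h]

-- one pass over the four directions in B's dfs
lemma pvB_step (border : List (List Bool)) (rows cols r c : Int) :
    ∀ (dirs : List (Int × Int)) (q v : List (Int × Int)),
    ∃ new : List (Int × Int),
      dirs.foldl
        (fun (s : List (Int × Int) × PySem.Set (Int × Int)) d =>
          if 0 ≤ r + d.1 ∧ r + d.1 < rows ∧ 0 ≤ c + d.2 ∧ c + d.2 < cols ∧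
              pvB_get border (r + d.1) (c + d.2) = true ∧ (r + d.1, c + d.2) ∉ s.2 then
            (s.1 ++ [(r + d.1, c + d.2)], PySem.Set.add s.2 (r + d.1, c + d.2))
          else s) (q, v)
      = (q ++ new, v ++ new) ∧
      new.Nodup ∧
      (∀ x ∈ new, x ∉ v ∧ (∃ d ∈ dirs, x = (r + d.1, c + d.2)) ∧
        pvInGrid rows cols x ∧ pvB_get border x.1 x.2 = true) ∧
      (∀ d ∈ dirs, ∀ y : Int × Int, y = (r + d.1, c + d.2) →
        pvInGrid rows cols y → pvB_get border y.1 y.2 = true → y ∈ v ++ new) := by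
  intro dirs
  induction dirs with
  | nil => intro q v; exact ⟨[], by simp⟩
  | cons d dirs ih =>
    intro q v
    simp only [List.foldl_cons]
    by_cases hc : 0 ≤ r + d.1 ∧ r + d.1 < rows ∧ 0 ≤ c + d.2 ∧ c + d.2 < cols ∧
        pvB_get border (r + d.1) (c + d.2) = true ∧ (r + d.1, c + d.2) ∉ v
    · rw [if_pos hc]
      have hnotv : (r + d.1, c + d.2) ∉ v := hc.2.2.2.2.2
      rw [PySem.Set.add_of_not_mem hnotv]
      obtain ⟨new', heq, hnd, hprops, hcompl⟩ := ih (q ++ [(r + d.1, c + d.2)]) (v ++ [(r + d.1, c + d.2)])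
      refine ⟨(r + d.1, c + d.2) :: new', ?_, ?_, ?_, ?_⟩
      · rw [heq]; simp
      · exact List.nodup_cons.2 ⟨fun hmem => ((hprops _ hmem).1) (by simp), hnd⟩
      · intro x hx
        rcases List.mem_cons.1 hx with hx | hx
        · subst hx
          exact ⟨hnotv, ⟨d, by simp, rfl⟩,
            ⟨hc.1, hc.2.1, hc.2.2.1, hc.2.2.2.1⟩, hc.2.2.2.2.1⟩
        · obtain ⟨hxv, ⟨d', hd', hde⟩, hg, hb⟩ := hprops _ hx
          exact ⟨fun hxv2 => hxv (by simp [hxv2]), ⟨d', by simp [hd'], hde⟩, hg, hb⟩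
      · intro d' hd' y hy hg hb
        rcases List.mem_cons.1 hd' with rfl | hd'
        · subst hy; simp
        · have := hcompl d' hd' y hy hg hb
          simpa using this
    · rw [if_neg hc]
      obtain ⟨new', heq, hnd, hprops, hcompl⟩ := ih q v
      refine ⟨new', heq, hnd, ?_, ?_⟩
      · intro x hx
        obtain ⟨hxv, ⟨d', hd', hde⟩, hg, hb⟩ := hprops _ hx
        exact ⟨hxv, ⟨d', by simp [hd'], hde⟩, hg, hb⟩
      · intro d' hd' y hy hg hb
        rcases List.mem_cons.1 hd' with rfl | hd'
        · subst hy
          rcases hg with ⟨g1, g2, g3, g4⟩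
          simp only [not_and, not_not] at hc
          exact List.mem_append.2 (Or.inl (hc g1 g2 g3 g4 hb))
        · exact hcompl d' hd' y hy hg hb

-- what B's running bounding box satisfies
def pvBB (bbox out : Int × Int × Int × Int) (S : Int × Int → Prop) : Prop :=
  ((out.1 = bbox.1 ∨ ∃ z, S z ∧ out.1 = z.1) ∧ out.1 ≤ bbox.1 ∧ ∀ z, S z → out.1 ≤ z.1) ∧
  ((out.2.1 = bbox.2.1 ∨ ∃ z, S z ∧ out.2.1 = z.2) ∧ out.2.1 ≤ bbox.2.1 ∧ ∀ z, S z → out.2.1 ≤ z.2) ∧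
  ((out.2.2.1 = bbox.2.2.1 ∨ ∃ z, S z ∧ out.2.2.1 = z.1) ∧ bbox.2.2.1 ≤ out.2.2.1 ∧ ∀ z, S z → z.1 ≤ out.2.2.1) ∧
  ((out.2.2.2 = bbox.2.2.2 ∨ ∃ z, S z ∧ out.2.2.2 = z.2) ∧ bbox.2.2.2 ≤ out.2.2.2 ∧ ∀ z, S z → z.2 ≤ out.2.2.2)

lemma pvBB_empty {b : Int × Int × Int × Int} {S : Int × Int → Prop}
    (h : ∀ z, S z → False) : pvBB b b S :=
  ⟨⟨Or.inl rfl, le_refl _, fun z hz => absurd hz (fun h2 => h z h2)⟩,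
   ⟨Or.inl rfl, le_refl _, fun z hz => absurd hz (fun h2 => h z h2)⟩,
   ⟨Or.inl rfl, le_refl _, fun z hz => absurd hz (fun h2 => h z h2)⟩,
   ⟨Or.inl rfl, le_refl _, fun z hz => absurd hz (fun h2 => h z h2)⟩⟩

lemma pvMin_transfer {b r out : Int} {S S' : (Int × Int) → Prop} {x0 : Int × Int}
    (f : Int × Int → Int) (hfx : f x0 = r) (hS : ∀ z, S z ↔ S' z ∨ z = x0)
    (h1 : out = min b r ∨ ∃ z, S' z ∧ out = f z) (h2 : out ≤ min b r)
    (h3 : ∀ z, S' z → out ≤ f z) :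
    (out = b ∨ ∃ z, S z ∧ out = f z) ∧ out ≤ b ∧ ∀ z, S z → out ≤ f z := by
  refine ⟨?_, le_trans h2 (min_le_left _ _), ?_⟩
  · rcases h1 with h | ⟨z, hz, he⟩
    · rcases min_cases b r with ⟨he2, _⟩ | ⟨he2, _⟩
      · exact Or.inl (h.trans he2)
      · exact Or.inr ⟨x0, (hS x0).2 (Or.inr rfl), by rw [h, he2, hfx]⟩
    · exact Or.inr ⟨z, (hS z).2 (Or.inl hz), he⟩
  · intro z hz
    rcases (hS z).1 hz with hz' | rfl
    · exact h3 z hz'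
    · rw [hfx]; exact le_trans h2 (min_le_right _ _)

lemma pvMax_transfer {b r out : Int} {S S' : (Int × Int) → Prop} {x0 : Int × Int}
    (f : Int × Int → Int) (hfx : f x0 = r) (hS : ∀ z, S z ↔ S' z ∨ z = x0)
    (h1 : out = max b r ∨ ∃ z, S' z ∧ out = f z) (h2 : max b r ≤ out)
    (h3 : ∀ z, S' z → f z ≤ out) :
    (out = b ∨ ∃ z, S z ∧ out = f z) ∧ b ≤ out ∧ ∀ z, S z → f z ≤ out := by
  refine ⟨?_, le_trans (le_max_left _ _) h2, ?_⟩
  · rcases h1 with h | ⟨z, hz, he⟩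
    · rcases max_cases b r with ⟨he2, _⟩ | ⟨he2, _⟩
      · exact Or.inl (h.trans he2)
      · exact Or.inr ⟨x0, (hS x0).2 (Or.inr rfl), by rw [h, he2, hfx]⟩
    · exact Or.inr ⟨z, (hS z).2 (Or.inl hz), he⟩
  · intro z hz
    rcases (hS z).1 hz with hz' | rfl
    · exact h3 z hz'
    · rw [hfx]; exact le_trans (le_max_right _ _) h2

-- full characterisation of B's dfs loop
lemma pvB_dfs_spec (border : List (List Bool)) (rows cols : Int) :
    ∀ (fuel : Nat) (stack : List (Int × Int)) (bbox : Int × Int × Int × Int) (v : List (Int × Int)),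
      (∀ x ∈ stack, x ∈ v) → v.Nodup →
      (∀ x ∈ v, pvInGrid rows cols x ∧ pvB_get border x.1 x.2 = true) →
      (∀ x ∈ v, x ∉ stack → ∀ y, pvAdj (fun z => pvB_get border z.1 z.2) rows cols x y → y ∈ v) →
      stack.length + (rows.toNat * cols.toNat + 1) * (rows.toNat * cols.toNat - v.length) ≤ fuel →
      (∀ x ∈ v, x ∈ (pvB_dfs border rows cols fuel stack bbox v).2) ∧
      (∀ x ∈ (pvB_dfs border rows cols fuel stack bbox v).2,
        x ∈ v ∨ ∃ s ∈ stack, pvReach (fun z => pvB_get border z.1 z.2) rows cols s x) ∧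
      (pvB_dfs border rows cols fuel stack bbox v).2.Nodup ∧
      (∀ x ∈ (pvB_dfs border rows cols fuel stack bbox v).2,
        pvInGrid rows cols x ∧ pvB_get border x.1 x.2 = true) ∧
      pvClosed (fun z => pvB_get border z.1 z.2) rows cols (pvB_dfs border rows cols fuel stack bbox v).2 ∧
      pvBB bbox (pvB_dfs border rows cols fuel stack bbox v).1
        (fun x => x ∈ stack ∨ (x ∈ (pvB_dfs border rows cols fuel stack bbox v).2 ∧ x ∉ v)) := by
  intro fuel
  induction fuel with
  | zero =>
    intro stack bbox v h1 h3 h4 h5 hfuel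
    have hq : stack = [] := List.eq_nil_of_length_eq_zero (by omega)
    subst hq
    simp only [pvB_dfs]
    refine ⟨fun x hx => hx, fun x hx => Or.inl hx, h3, h4,
      fun x hx y hy => h5 x hx (by simp) y hy, ?_⟩
    exact pvBB_empty (by
      rintro z (hz | ⟨hz1, hz2⟩)
      · simp at hz
      · exact hz2 hz1)
  | succ fuel ih =>
    intro stack bbox v h1 h3 h4 h5 hfuel
    rcases List.eq_nil_or_concat stack with rfl | ⟨ys, x0, rfl⟩
    · simp only [pvB_dfs, pvPop_nil]
      refine ⟨fun x hx => hx, fun x hx => Or.inl hx, h3, h4,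
        fun x hx y hy => h5 x hx (by simp) y hy, ?_⟩
      exact pvBB_empty (by
        rintro z (hz | ⟨hz1, hz2⟩)
        · simp at hz
        · exact hz2 hz1)
    · obtain ⟨r, c⟩ := x0
      rw [List.concat_eq_append] at h1 h5 hfuel ⊢
      simp only [pvB_dfs, pvPop_concat]
      obtain ⟨new, heq, hnd, hprops, hcompl⟩ :=
        pvB_step border rows cols r c [((-1 : Int), (0 : Int)), (1, 0), (0, -1), (0, 1)] ys v
      rw [heq]
      simp only []
      have hrc_v : (r, c) ∈ v := h1 _ (by simp)
      have hdisj : v.Disjoint new := fun z hzv hznew => (hprops z hznew).1 hzv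
      have hnd' : (v ++ new).Nodup := List.Nodup.append h3 hnd hdisj
      have hP' : ∀ x ∈ v ++ new, pvInGrid rows cols x ∧ pvB_get border x.1 x.2 = true := by
        intro x hx
        rcases List.mem_append.1 hx with hx | hx
        · exact h4 x hx
        · exact ⟨(hprops x hx).2.2.1, (hprops x hx).2.2.2⟩
      have hq' : ∀ x ∈ ys ++ new, x ∈ v ++ new := by
        intro x hx
        rcases List.mem_append.1 hx with hx | hx
        · exact List.mem_append.2 (Or.inl (h1 x (by simp [hx])))
        · exact List.mem_append.2 (Or.inr hx)
      have hcl' : ∀ x ∈ v ++ new, x ∉ ys ++ new →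
          ∀ y, pvAdj (fun z => pvB_get border z.1 z.2) rows cols x y → y ∈ v ++ new := by
        intro x hxv hxq y hadj
        rcases List.mem_append.1 hxv with hx | hx
        · by_cases hxc : x = (r, c)
          · subst hxc
            obtain ⟨hnb, hg, hb⟩ := hadj
            obtain ⟨d, hd, rfl⟩ := pvDir_of_nb hnb
            exact hcompl d hd _ rfl hg hb
          · refine List.mem_append.2 (Or.inl (h5 x hx ?_ y hadj))
            intro hxq2
            rcases List.mem_append.1 hxq2 with h | h
            · exact hxq (List.mem_append.2 (Or.inl h))
            · exact hxc (by simpa using h)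
        · exact absurd (List.mem_append.2 (Or.inr hx)) hxq
      have hN : (v ++ new).length ≤ rows.toNat * cols.toNat :=
        pvCard hnd' (fun x hx => (hP' x hx).1)
      have hfuel' : (ys ++ new).length +
          (rows.toNat * cols.toNat + 1) * (rows.toNat * cols.toNat - (v ++ new).length) ≤ fuel := by
        have hlen : (v ++ new).length = v.length + new.length := List.length_append
        have hlenq : (ys ++ new).length = ys.length + new.length := List.length_append
        have hlens : (ys ++ [(r, c)]).length = ys.length + 1 := by simp
        rw [hlen, hlenq]
        refine pvFuelStep (by omega) (by omega)
      obtain ⟨i1, i2, i3, i4, i5, i6⟩ := ih (ys ++ new)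
        (min bbox.1 r, min bbox.2.1 c, max bbox.2.2.1 r, max bbox.2.2.2 c)
        (v ++ new) hq' hnd' hP' hcl' hfuel'
      have hnew_sub : ∀ x ∈ new,
          x ∈ (pvB_dfs border rows cols fuel (ys ++ new)
            (min bbox.1 r, min bbox.2.1 c, max bbox.2.2.1 r, max bbox.2.2.2 c) (v ++ new)).2 :=
        fun x hx => i1 x (List.mem_append.2 (Or.inr hx))
      have hreach_new : ∀ x ∈ new,
          pvReach (fun z => pvB_get border z.1 z.2) rows cols (r, c) x := by
        intro x hx
        obtain ⟨_, ⟨d, hd, rfl⟩, hg, hb⟩ := hprops x hx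
        exact Relation.ReflTransGen.single ⟨pvNb_of_dir hd, hg, hb⟩
      refine ⟨?_, ?_, i3, i4, i5, ?_⟩
      · exact fun x hx => i1 x (List.mem_append.2 (Or.inl hx))
      · intro x hx
        rcases i2 x hx with hx2 | ⟨s, hs, hr⟩
        · rcases List.mem_append.1 hx2 with h | h
          · exact Or.inl h
          · exact Or.inr ⟨(r, c), by simp, hreach_new x h⟩
        · rcases List.mem_append.1 hs with h | h
          · exact Or.inr ⟨s, by simp [h], hr⟩
          · exact Or.inr ⟨(r, c), by simp,
              Relation.ReflTransGen.trans (hreach_new s h) hr⟩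
      · -- bounding box transfer
        have hS : ∀ z, (z ∈ ys ++ [(r, c)] ∨
            (z ∈ (pvB_dfs border rows cols fuel (ys ++ new)
              (min bbox.1 r, min bbox.2.1 c, max bbox.2.2.1 r, max bbox.2.2.2 c) (v ++ new)).2 ∧ z ∉ v)) ↔
            ((z ∈ ys ++ new ∨
              (z ∈ (pvB_dfs border rows cols fuel (ys ++ new)
                (min bbox.1 r, min bbox.2.1 c, max bbox.2.2.1 r, max bbox.2.2.2 c) (v ++ new)).2 ∧
                z ∉ v ++ new)) ∨ z = (r, c)) := by
          intro z
          constructor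
          · rintro (hz | ⟨hz1, hz2⟩)
            · rcases List.mem_append.1 hz with h | h
              · exact Or.inl (Or.inl (List.mem_append.2 (Or.inl h)))
              · exact Or.inr (by simpa using h)
            · by_cases hzn : z ∈ new
              · exact Or.inl (Or.inl (List.mem_append.2 (Or.inr hzn)))
              · refine Or.inl (Or.inr ⟨hz1, ?_⟩)
                intro hzz
                rcases List.mem_append.1 hzz with h | h
                · exact hz2 h
                · exact hzn h
          · rintro ((hz | ⟨hz1, hz2⟩) | rfl)
            · rcases List.mem_append.1 hz with h | h
              · exact Or.inl (List.mem_append.2 (Or.inl h))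
              · exact Or.inr ⟨hnew_sub z h, (hprops z h).1⟩
            · exact Or.inr ⟨hz1, fun hzz => hz2 (List.mem_append.2 (Or.inl hzz))⟩
            · exact Or.inl (by simp)
        obtain ⟨j1, j2, j3, j4⟩ := i6
        exact ⟨pvMin_transfer (fun z => z.1) rfl hS j1.1 j1.2.1 j1.2.2,
          pvMin_transfer (fun z => z.2) rfl hS j2.1 j2.2.1 j2.2.2,
          pvMax_transfer (fun z => z.1) rfl hS j3.1 j3.2.1 j3.2.2,
          pvMax_transfer (fun z => z.2) rfl hS j4.1 j4.2.1 j4.2.2⟩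

-- the two border tests agree on every in-grid cell (Pre_ rules out ragged maps)
lemma pvT_eq (bm : List (List (List (String × Bool)))) (hpre : Pre_detect_table_areas bm) :
    ∀ x : Int × Int,
      pvInGrid (PySem.List.len bm) (PySem.List.len (PySem.List.pyGetD bm 0 [])) x →
      pvA_isB bm x.1 x.2 =
        pvB_get (pvB_grid bm (PySem.List.len (PySem.List.pyGetD bm 0 []))) x.1 x.2 := by
  obtain ⟨hne, hrows⟩ := hpre
  intro x hx
  obtain ⟨r, c⟩ := x
  obtain ⟨h1, h2, h3, h4⟩ := hx
  simp only at h1 h2 h3 h4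
  have hget0 : PySem.List.pyGetD bm 0 ([] : List (List (String × Bool))) = bm.headD [] := by
    rw [PySem.List.pyGetD_zero]
    cases bm
    · simp
    · simp
  have hcols : PySem.List.len (PySem.List.pyGetD bm 0 ([] : List (List (String × Bool)))) =
      ((bm.headD []).length : Int) := by
    rw [hget0, PySem.List.len_eq]
  have hlen : PySem.List.len bm = (bm.length : Int) := PySem.List.len_eq bm
  rw [hlen] at h2
  rw [hcols] at h4
  have hr : r.toNat < bm.length := by omega
  have hrowA : PySem.List.pyGetD bm r ([] : List (List (String × Bool))) = bm[r.toNat] :=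
    PySem.List.pyGetD_eq_getElem bm ([] : List (List (String × Bool))) h1 (by exact_mod_cast h2)
  have hrowlen : (bm.headD []).length ≤ (bm[r.toNat]).length := hrows _ (List.getElem_mem _)
  have hc : c.toNat < (bm[r.toNat]).length := by omega
  have hcellA : PySem.List.pyGetD (bm[r.toNat]) c ([] : List (String × Bool)) = (bm[r.toNat])[c.toNat] :=
    PySem.List.pyGetD_eq_getElem _ ([] : List (String × Bool)) h3 (by omega)
  have hA : pvA_isB bm r c =
      (PySem.Dict.ofList ((bm[r.toNat])[c.toNat])).values.any (fun b => b) := by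
    simp only [pvA_isB, hrowA, hcellA]
  have hB : pvB_get (pvB_grid bm (PySem.List.len (PySem.List.pyGetD bm 0 []))) r c =
      pvB_test ((bm[r.toNat])[c.toNat]) := by
    simp only [pvB_get, pvB_grid, hcols]
    have hmr : r.toNat < (bm.map (fun row =>
        (PySem.List.slice row none (some ((bm.headD []).length : Int))).map pvB_test)).length := by
      simpa using hr
    rw [List.getD_eq_getElem _ _ hmr, List.getElem_map]
    rw [PySem.List.slice_to_natCast]
    have hct : c.toNat < (((bm[r.toNat]).take (bm.headD []).length).map pvB_test).length := by
      simp only [List.length_map, List.length_take]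
      omega
    rw [List.getD_eq_getElem _ _ hct, List.getElem_map, List.getElem_take]
  rw [hA, hB]
  rfl

-- the outer-loop invariant tying the two ports together
def pvRel (bm : List (List (List (String × Bool)))) (rows cols : Int)
    (stA stB : PySem.Set (Int × Int) × List (Int × Int × Int × Int)) : Prop :=
  (∀ x, x ∈ stA.1 ↔ x ∈ stB.1) ∧ stA.2 = stB.2 ∧ stA.1.Nodup ∧ stB.1.Nodup ∧
  (∀ x ∈ stA.1, pvInGrid rows cols x ∧ pvA_isB bm x.1 x.2 = true) ∧
  pvClosed (fun z => pvA_isB bm z.1 z.2) rows cols stA.1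

-- one grid cell of the outer loops
lemma pv_cell (bm : List (List (List (String × Bool)))) (border : List (List Bool))
    (rows cols : Int) (fuel : Nat)
    (hT : ∀ x : Int × Int, pvInGrid rows cols x → pvA_isB bm x.1 x.2 = pvB_get border x.1 x.2)
    (hfuel : fuel = (rows.toNat * cols.toNat + 1) * (rows.toNat * cols.toNat + 1))
    (i j : Int) (hij : pvInGrid rows cols (i, j))
    (stA stB : PySem.Set (Int × Int) × List (Int × Int × Int × Int))
    (hrel : pvRel bm rows cols stA stB) :
    pvRel bm rows cols
      (if pvA_isB bm i j = true ∧ (i, j) ∉ stA.1 then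
        ((pvA_bfs bm rows cols fuel [(i, j)] (PySem.Set.add PySem.Set.empty (i, j))
            (PySem.Set.add stA.1 (i, j))).2,
         stA.2 ++ [pvA_bbox (pvA_bfs bm rows cols fuel [(i, j)]
            (PySem.Set.add PySem.Set.empty (i, j)) (PySem.Set.add stA.1 (i, j))).1])
       else stA)
      (if pvB_get border i j = true ∧ (i, j) ∉ stB.1 then
        ((pvB_dfs border rows cols fuel [(i, j)] (i, j, i, j) (PySem.Set.add stB.1 (i, j))).2,
         stB.2 ++ [((pvB_dfs border rows cols fuel [(i, j)] (i, j, i, j)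
              (PySem.Set.add stB.1 (i, j))).1.1 + 1,
            (pvB_dfs border rows cols fuel [(i, j)] (i, j, i, j)
              (PySem.Set.add stB.1 (i, j))).1.2.1 + 1,
            (pvB_dfs border rows cols fuel [(i, j)] (i, j, i, j)
              (PySem.Set.add stB.1 (i, j))).1.2.2.1 + 1,
            (pvB_dfs border rows cols fuel [(i, j)] (i, j, i, j)
              (PySem.Set.add stB.1 (i, j))).1.2.2.2 + 1)])
       else stB) := by
  obtain ⟨hmem, hareas, hndA, hndB, hPA, hclA⟩ := hrel
  have hTij : pvA_isB bm i j = pvB_get border i j := by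
    have := hT (i, j) hij
    simpa using this
  by_cases hg : pvA_isB bm i j = true ∧ (i, j) ∉ stA.1
  case neg =>
    have hg' : ¬(pvB_get border i j = true ∧ (i, j) ∉ stB.1) := by
      rw [← hTij]
      rintro ⟨u1, u2⟩
      exact hg ⟨u1, fun hm => u2 ((hmem _).1 hm)⟩
    rw [if_neg hg, if_neg hg']
    exact ⟨hmem, hareas, hndA, hndB, hPA, hclA⟩
  case pos =>
    obtain ⟨hb, hnm⟩ := hg
    have hbB : pvB_get border i j = true := by rw [← hTij]; exact hb
    have hnmB : (i, j) ∉ stB.1 := fun hm => hnm ((hmem _).2 hm)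
    rw [if_pos ⟨hb, hnm⟩, if_pos ⟨hbB, hnmB⟩]
    have haddA : PySem.Set.add stA.1 (i, j) = stA.1 ++ [(i, j)] := PySem.Set.add_of_not_mem hnm
    have haddB : PySem.Set.add stB.1 (i, j) = stB.1 ++ [(i, j)] := PySem.Set.add_of_not_mem hnmB
    have haddE : PySem.Set.add (PySem.Set.empty : PySem.Set (Int × Int)) (i, j) = [(i, j)] := by
      rw [PySem.Set.add_of_not_mem (by simp [PySem.Set.empty])]
      simp [PySem.Set.empty]
    rw [haddA, haddB, haddE]
    -- invariants for A's bfs call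
    have hndA' : (stA.1 ++ [(i, j)]).Nodup := by
      refine List.Nodup.append hndA (List.nodup_singleton _) ?_
      intro x hx hx2
      rcases List.mem_singleton.1 hx2 with rfl
      exact hnm hx
    have hPA' : ∀ x ∈ stA.1 ++ [(i, j)], pvInGrid rows cols x ∧ pvA_isB bm x.1 x.2 = true := by
      intro x hx
      rcases List.mem_append.1 hx with hx | hx
      · exact hPA x hx
      · rcases List.mem_singleton.1 hx with rfl
        exact ⟨hij, by simpa using hb⟩
    have hclA' : ∀ x ∈ stA.1 ++ [(i, j)], x ∉ [(i, j)] →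
        ∀ y, pvAdj (fun z => pvA_isB bm z.1 z.2) rows cols x y → y ∈ stA.1 ++ [(i, j)] := by
      intro x hx hxq y hadj
      rcases List.mem_append.1 hx with hx | hx
      · exact List.mem_append.2 (Or.inl (hclA x hx y hadj))
      · exact absurd hx hxq
    obtain ⟨a1, a2, a3, a4, a5, a6⟩ :=
      pvA_bfs_spec bm rows cols fuel [(i, j)] [(i, j)] (stA.1 ++ [(i, j)])
        (by intro x hx; rcases List.mem_singleton.1 hx with rfl; exact List.mem_append.2 (Or.inr (by simp)))
        (by intro x hx; rcases List.mem_singleton.1 hx with rfl; exact List.mem_append.2 (Or.inr (by simp)))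
        hndA' hPA' hclA'
        (by rw [hfuel]; simpa using pvFuelTop (rows.toNat * cols.toNat) (stA.1 ++ [(i, j)]).length)
    -- invariants for B's dfs call
    have hndB' : (stB.1 ++ [(i, j)]).Nodup := by
      refine List.Nodup.append hndB (List.nodup_singleton _) ?_
      intro x hx hx2
      rcases List.mem_singleton.1 hx2 with rfl
      exact hnmB hx
    have hPB' : ∀ x ∈ stB.1 ++ [(i, j)], pvInGrid rows cols x ∧ pvB_get border x.1 x.2 = true := by
      intro x hx
      rcases List.mem_append.1 hx with hx | hx
      · have hx' := (hmem x).2 hx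
        obtain ⟨hg1, hg2⟩ := hPA x hx'
        exact ⟨hg1, by rw [← hT x hg1]; exact hg2⟩
      · rcases List.mem_singleton.1 hx with rfl
        exact ⟨hij, by simpa using hbB⟩
    have hclB' : ∀ x ∈ stB.1 ++ [(i, j)], x ∉ [(i, j)] →
        ∀ y, pvAdj (fun z => pvB_get border z.1 z.2) rows cols x y → y ∈ stB.1 ++ [(i, j)] := by
      intro x hx hxq y hadj
      rcases List.mem_append.1 hx with hx | hx
      · obtain ⟨hnb, hgy, hby⟩ := hadj
        have hadjA : pvAdj (fun z => pvA_isB bm z.1 z.2) rows cols x y :=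
          ⟨hnb, hgy, by show pvA_isB bm y.1 y.2 = true; rw [hT y hgy]; simpa using hby⟩
        exact List.mem_append.2 (Or.inl ((hmem y).1 (hclA x ((hmem x).2 hx) y hadjA)))
      · exact absurd hx hxq
    obtain ⟨b1, b2, b3, b4, b5, b6⟩ :=
      pvB_dfs_spec border rows cols fuel [(i, j)] (i, j, i, j) (stB.1 ++ [(i, j)])
        (by intro x hx; rcases List.mem_singleton.1 hx with rfl; exact List.mem_append.2 (Or.inr (by simp)))
        hndB' hPB' hclB'
        (by rw [hfuel]; simpa using pvFuelTop (rows.toNat * cols.toNat) (stB.1 ++ [(i, j)]).length)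
    set outA := pvA_bfs bm rows cols fuel [(i, j)] [(i, j)] (stA.1 ++ [(i, j)]) with houtA
    set outB := pvB_dfs border rows cols fuel [(i, j)] (i, j, i, j) (stB.1 ++ [(i, j)]) with houtB
    have hseedP : pvInGrid rows cols (i, j) ∧ pvA_isB bm (i, j).1 (i, j).2 = true :=
      ⟨hij, by simpa using hb⟩
    have hRiff : ∀ x, pvReach (fun z => pvB_get border z.1 z.2) rows cols (i, j) x ↔
        pvReach (fun z => pvA_isB bm z.1 z.2) rows cols (i, j) x :=
      fun x => ⟨pvReach_congr (fun y hy => (hT y hy).symm), pvReach_congr (fun y hy => hT y hy)⟩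
    have hA2 : ∀ x, x ∈ outA.2 ↔
        (x ∈ stA.1 ∨ pvReach (fun z => pvA_isB bm z.1 z.2) rows cols (i, j) x) := by
      intro x
      constructor
      · intro hx
        rcases a2 x hx with hx2 | ⟨s, hs, hr⟩
        · rcases List.mem_append.1 hx2 with h | h
          · exact Or.inl h
          · rcases List.mem_singleton.1 h with rfl
            exact Or.inr Relation.ReflTransGen.refl
        · rcases List.mem_singleton.1 hs with rfl
          exact Or.inr hr
      · rintro (hx | hx)
        · exact a1 x (List.mem_append.2 (Or.inl hx))
        · exact pvReach_mem_of_closed a6 (a1 _ (List.mem_append.2 (Or.inr (by simp)))) hx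
    have hB2 : ∀ x, x ∈ outB.2 ↔
        (x ∈ stB.1 ∨ pvReach (fun z => pvB_get border z.1 z.2) rows cols (i, j) x) := by
      intro x
      constructor
      · intro hx
        rcases b2 x hx with hx2 | ⟨s, hs, hr⟩
        · rcases List.mem_append.1 hx2 with h | h
          · exact Or.inl h
          · rcases List.mem_singleton.1 h with rfl
            exact Or.inr Relation.ReflTransGen.refl
        · rcases List.mem_singleton.1 hs with rfl
          exact Or.inr hr
      · rintro (hx | hx)
        · exact b1 x (List.mem_append.2 (Or.inl hx))
        · exact pvReach_mem_of_closed b5 (b1 _ (List.mem_append.2 (Or.inr (by simp)))) hx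
    have hmem' : ∀ x, x ∈ outA.2 ↔ x ∈ outB.2 := by
      intro x
      rw [hA2 x, hB2 x, hmem x]
      exact or_congr Iff.rfl (hRiff x).symm
    have hReach_not_inA : ∀ x, pvReach (fun z => pvA_isB bm z.1 z.2) rows cols (i, j) x →
        x ∉ stA.1 := by
      intro x hr hx
      exact hnm (pvReach_mem_of_closed hclA hx (pvReach_rev hseedP hr).2)
    have hArea : ∀ x, x ∈ outA.1 ↔ pvReach (fun z => pvA_isB bm z.1 z.2) rows cols (i, j) x := by
      intro x
      rw [a3 x]
      constructor
      · rintro (hx | ⟨hx2, hx3⟩)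
        · rcases List.mem_singleton.1 hx with rfl
          exact Relation.ReflTransGen.refl
        · rcases (hA2 x).1 hx2 with h | h
          · exact absurd (List.mem_append.2 (Or.inl h)) hx3
          · exact h
      · intro hr
        by_cases hxe : x = (i, j)
        · exact Or.inl (by simp [hxe])
        · refine Or.inr ⟨(hA2 x).2 (Or.inr hr), ?_⟩
          intro hx
          rcases List.mem_append.1 hx with h | h
          · exact hReach_not_inA x hr h
          · exact hxe (List.mem_singleton.1 h)
    have hS : ∀ x, (x ∈ [(i, j)] ∨ (x ∈ outB.2 ∧ x ∉ stB.1 ++ [(i, j)])) ↔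
        pvReach (fun z => pvA_isB bm z.1 z.2) rows cols (i, j) x := by
      intro x
      constructor
      · rintro (hx | ⟨hx2, hx3⟩)
        · rcases List.mem_singleton.1 hx with rfl
          exact Relation.ReflTransGen.refl
        · rcases (hB2 x).1 hx2 with h | h
          · exact absurd (List.mem_append.2 (Or.inl h)) hx3
          · exact (hRiff x).1 h
      · intro hr
        by_cases hxe : x = (i, j)
        · exact Or.inl (by simp [hxe])
        · refine Or.inr ⟨(hB2 x).2 (Or.inr ((hRiff x).2 hr)), ?_⟩
          intro hx
          rcases List.mem_append.1 hx with h | h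
          · exact hReach_not_inA x hr ((hmem x).2 h)
          · exact hxe (List.mem_singleton.1 h)
    have hij_area : (i, j) ∈ outA.1 := (hArea _).2 Relation.ReflTransGen.refl
    -- the four extrema
    obtain ⟨jr1, jr2, jr3, jr4⟩ := b6
    rcases hmin1 : PySem.List.min? (outA.1.map (fun p => p.1)) (fun x => x) with _ | m1
    · exfalso
      have h0 := (PySem.List.min?_eq_none_iff (outA.1.map (fun p => p.1)) (fun x => x)).1 hmin1
      rw [List.map_eq_nil_iff] at h0
      rw [h0] at hij_area
      simp at hij_area
    rcases hmin2 : PySem.List.min? (outA.1.map (fun p => p.2)) (fun x => x) with _ | m2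
    · exfalso
      have h0 := (PySem.List.min?_eq_none_iff (outA.1.map (fun p => p.2)) (fun x => x)).1 hmin2
      rw [List.map_eq_nil_iff] at h0
      rw [h0] at hij_area
      simp at hij_area
    rcases hmax1 : PySem.List.max? (outA.1.map (fun p => p.1)) (fun x => x) with _ | m3
    · exfalso
      have h0 := (PySem.List.max?_eq_none_iff (outA.1.map (fun p => p.1)) (fun x => x)).1 hmax1
      rw [List.map_eq_nil_iff] at h0
      rw [h0] at hij_area
      simp at hij_area
    rcases hmax2 : PySem.List.max? (outA.1.map (fun p => p.2)) (fun x => x) with _ | m4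
    · exfalso
      have h0 := (PySem.List.max?_eq_none_iff (outA.1.map (fun p => p.2)) (fun x => x)).1 hmax2
      rw [List.map_eq_nil_iff] at h0
      rw [h0] at hij_area
      simp at hij_area
    have hbbA : pvA_bbox outA.1 = (m1 + 1, m2 + 1, m3 + 1, m4 + 1) := by
      simp [pvA_bbox, hmin1, hmin2, hmax1, hmax2]
    have em1 : m1 = outB.1.1 := by
      apply le_antisymm
      · rcases jr1.1 with he | ⟨z, hz, he⟩
        · rw [he]
          exact PySem.List.min?_isMin hmin1 _ (List.mem_map.2 ⟨(i, j), hij_area, rfl⟩)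
        · rw [he]
          exact PySem.List.min?_isMin hmin1 _
            (List.mem_map.2 ⟨z, (hArea z).2 ((hS z).1 hz), rfl⟩)
      · obtain ⟨x, hxa, hxe⟩ := List.mem_map.1 (PySem.List.min?_mem hmin1)
        rw [← hxe]
        exact jr1.2.2 x ((hS x).2 ((hArea x).1 hxa))
    have em2 : m2 = outB.1.2.1 := by
      apply le_antisymm
      · rcases jr2.1 with he | ⟨z, hz, he⟩
        · rw [he]
          exact PySem.List.min?_isMin hmin2 _ (List.mem_map.2 ⟨(i, j), hij_area, rfl⟩)
        · rw [he]
          exact PySem.List.min?_isMin hmin2 _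
            (List.mem_map.2 ⟨z, (hArea z).2 ((hS z).1 hz), rfl⟩)
      · obtain ⟨x, hxa, hxe⟩ := List.mem_map.1 (PySem.List.min?_mem hmin2)
        rw [← hxe]
        exact jr2.2.2 x ((hS x).2 ((hArea x).1 hxa))
    have em3 : m3 = outB.1.2.2.1 := by
      apply le_antisymm
      · obtain ⟨x, hxa, hxe⟩ := List.mem_map.1 (PySem.List.max?_mem hmax1)
        rw [← hxe]
        exact jr3.2.2 x ((hS x).2 ((hArea x).1 hxa))
      · rcases jr3.1 with he | ⟨z, hz, he⟩
        · rw [he]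
          exact PySem.List.max?_isMax hmax1 _ (List.mem_map.2 ⟨(i, j), hij_area, rfl⟩)
        · rw [he]
          exact PySem.List.max?_isMax hmax1 _
            (List.mem_map.2 ⟨z, (hArea z).2 ((hS z).1 hz), rfl⟩)
    have em4 : m4 = outB.1.2.2.2 := by
      apply le_antisymm
      · obtain ⟨x, hxa, hxe⟩ := List.mem_map.1 (PySem.List.max?_mem hmax2)
        rw [← hxe]
        exact jr4.2.2 x ((hS x).2 ((hArea x).1 hxa))
      · rcases jr4.1 with he | ⟨z, hz, he⟩
        · rw [he]
          exact PySem.List.max?_isMax hmax2 _ (List.mem_map.2 ⟨(i, j), hij_area, rfl⟩)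
        · rw [he]
          exact PySem.List.max?_isMax hmax2 _
            (List.mem_map.2 ⟨z, (hArea z).2 ((hS z).1 hz), rfl⟩)
    exact ⟨hmem', by rw [hareas, hbbA, em1, em2, em3, em4], a4, b3, a5, a6⟩

-- the inner loop over one row
lemma pv_inner (bm : List (List (List (String × Bool)))) (border : List (List Bool))
    (rows cols : Int) (fuel : Nat)
    (hT : ∀ x : Int × Int, pvInGrid rows cols x → pvA_isB bm x.1 x.2 = pvB_get border x.1 x.2)
    (hfuel : fuel = (rows.toNat * cols.toNat + 1) * (rows.toNat * cols.toNat + 1)) (i : Int) :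
    ∀ (js : List Int) (stA stB : PySem.Set (Int × Int) × List (Int × Int × Int × Int)),
      (∀ j ∈ js, pvInGrid rows cols (i, j)) → pvRel bm rows cols stA stB →
      pvRel bm rows cols
        (js.foldl (fun (st : PySem.Set (Int × Int) × List (Int × Int × Int × Int)) j =>
          if pvA_isB bm i j = true ∧ (i, j) ∉ st.1 then
            ((pvA_bfs bm rows cols fuel [(i, j)] (PySem.Set.add PySem.Set.empty (i, j))
                (PySem.Set.add st.1 (i, j))).2,
             st.2 ++ [pvA_bbox (pvA_bfs bm rows cols fuel [(i, j)]
                (PySem.Set.add PySem.Set.empty (i, j)) (PySem.Set.add st.1 (i, j))).1])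
          else st) stA)
        (js.foldl (fun (st : PySem.Set (Int × Int) × List (Int × Int × Int × Int)) j =>
          if pvB_get border i j = true ∧ (i, j) ∉ st.1 then
            ((pvB_dfs border rows cols fuel [(i, j)] (i, j, i, j) (PySem.Set.add st.1 (i, j))).2,
             st.2 ++ [((pvB_dfs border rows cols fuel [(i, j)] (i, j, i, j)
                  (PySem.Set.add st.1 (i, j))).1.1 + 1,
                (pvB_dfs border rows cols fuel [(i, j)] (i, j, i, j)
                  (PySem.Set.add st.1 (i, j))).1.2.1 + 1,
                (pvB_dfs border rows cols fuel [(i, j)] (i, j, i, j)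
                  (PySem.Set.add st.1 (i, j))).1.2.2.1 + 1,
                (pvB_dfs border rows cols fuel [(i, j)] (i, j, i, j)
                  (PySem.Set.add st.1 (i, j))).1.2.2.2 + 1)])
          else st) stB) := by
  intro js
  induction js with
  | nil => intro stA stB _ h; exact h
  | cons j js ih =>
    intro stA stB hjs hrel
    simp only [List.foldl_cons]
    exact ih _ _ (fun j' hj' => hjs j' (by simp [hj']))
      (pv_cell bm border rows cols fuel hT hfuel i j (hjs j (by simp)) stA stB hrel)

-- the outer loop over the rows
lemma pv_outer (bm : List (List (List (String × Bool)))) (border : List (List Bool))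
    (rows cols : Int) (fuel : Nat)
    (hT : ∀ x : Int × Int, pvInGrid rows cols x → pvA_isB bm x.1 x.2 = pvB_get border x.1 x.2)
    (hfuel : fuel = (rows.toNat * cols.toNat + 1) * (rows.toNat * cols.toNat + 1)) :
    ∀ (is : List Int) (stA stB : PySem.Set (Int × Int) × List (Int × Int × Int × Int)),
      (∀ i ∈ is, 0 ≤ i ∧ i < rows) → pvRel bm rows cols stA stB →
      pvRel bm rows cols
        (is.foldl (fun st i => (PySem.List.pyRange 0 cols 1).foldl
          (fun (st : PySem.Set (Int × Int) × List (Int × Int × Int × Int)) j =>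
            if pvA_isB bm i j = true ∧ (i, j) ∉ st.1 then
              ((pvA_bfs bm rows cols fuel [(i, j)] (PySem.Set.add PySem.Set.empty (i, j))
                  (PySem.Set.add st.1 (i, j))).2,
               st.2 ++ [pvA_bbox (pvA_bfs bm rows cols fuel [(i, j)]
                  (PySem.Set.add PySem.Set.empty (i, j)) (PySem.Set.add st.1 (i, j))).1])
            else st) st) stA)
        (is.foldl (fun st i => (PySem.List.pyRange 0 cols 1).foldl
          (fun (st : PySem.Set (Int × Int) × List (Int × Int × Int × Int)) j =>
            if pvB_get border i j = true ∧ (i, j) ∉ st.1 then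
              ((pvB_dfs border rows cols fuel [(i, j)] (i, j, i, j) (PySem.Set.add st.1 (i, j))).2,
               st.2 ++ [((pvB_dfs border rows cols fuel [(i, j)] (i, j, i, j)
                    (PySem.Set.add st.1 (i, j))).1.1 + 1,
                  (pvB_dfs border rows cols fuel [(i, j)] (i, j, i, j)
                    (PySem.Set.add st.1 (i, j))).1.2.1 + 1,
                  (pvB_dfs border rows cols fuel [(i, j)] (i, j, i, j)
                    (PySem.Set.add st.1 (i, j))).1.2.2.1 + 1,
                  (pvB_dfs border rows cols fuel [(i, j)] (i, j, i, j)
                    (PySem.Set.add st.1 (i, j))).1.2.2.2 + 1)])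
            else st) st) stB) := by
  intro is
  induction is with
  | nil => intro stA stB _ h; exact h
  | cons i is ih =>
    intro stA stB his hrel
    simp only [List.foldl_cons]
    refine ih _ _ (fun i' hi' => his i' (by simp [hi'])) ?_
    refine pv_inner bm border rows cols fuel hT hfuel i (PySem.List.pyRange 0 cols 1) stA stB ?_ hrel
    intro j hj
    have hjb := PySem.List.mem_pyRange_one.1 hj
    have hib := his i (by simp)
    exact ⟨hib.1, hib.2, hjb.1, hjb.2⟩

-- ===== VERDICT (by name: the statement is the Claim_ definition above) =====
theorem detect_table_areas_spec : Claim_equal_detect_table_areas := by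
  intro bm _ hpre
  unfold Spec_detect_table_areas
  have hrel := pv_outer bm
    (pvB_grid bm (PySem.List.len (PySem.List.pyGetD bm 0 [])))
    (PySem.List.len bm) (PySem.List.len (PySem.List.pyGetD bm 0 []))
    (((PySem.List.len bm).toNat * (PySem.List.len (PySem.List.pyGetD bm 0 [])).toNat + 1) *
      ((PySem.List.len bm).toNat * (PySem.List.len (PySem.List.pyGetD bm 0 [])).toNat + 1))
    (pvT_eq bm hpre) rfl
    (PySem.List.pyRange 0 (PySem.List.len bm) 1)
    (PySem.Set.empty, ([] : List (Int × Int × Int × Int)))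
    (PySem.Set.empty, ([] : List (Int × Int × Int × Int)))
    (fun i hi => by
      have := PySem.List.mem_pyRange_one.1 hi
      exact ⟨this.1, this.2⟩)
    (by
      refine ⟨fun x => Iff.rfl, rfl, ?_, ?_, ?_, ?_⟩
      · simp [PySem.Set.empty]
      · simp [PySem.Set.empty]
      · intro x hx; simp [PySem.Set.empty] at hx
      · intro x hx; simp [PySem.Set.empty] at hx)
  exact hrel.2.1
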